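-- pv_equiv track=rewrite | github.com/Jaycelation/Python-PTIT | PY01041 - So tang giam.py | check
-- ===== SOURCE A (Python) =====
-- def check(n):
--     s = str(n)
--     if len(s) < 3:
--         return False
--
--     peak = -1
--     for i in range(1, len(s)):
--         if s[i] <= s[i-1]:
--             peak = i - 1
--             break
--
--     if peak == -1 or peak == 0:
--         return False
--
--     for i in range(peak + 1, len(s)):
--         if s[i] >= s[i-1]:
--             return False
--
--     return True
-- ===== SOURCE B (Python) =====
-- def check(n):
--     # single-pass state machine over adjacent character pairs of str(n)
--     s = str(n)
--     rising = False
--     falling = False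
--     for a, b in zip(s, s[1:]):
--         if a == b:
--             return False
--         if a < b:
--             if falling:
--                 return False
--             rising = True
--         else:
--             if not rising:
--                 return False
--             falling = True
--     return rising and falling
-- ===== Notes on version B (the rewrite author's own statement) =====
-- stated objective: simpler
-- what changed: A locates the peak with a first-descent scan with break and then runs a second index loop over the tail; B makes one pass over adjacent character pairs of str(n) carrying rising/falling flags, with no peak index and no second loop.
import Mathlib
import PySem

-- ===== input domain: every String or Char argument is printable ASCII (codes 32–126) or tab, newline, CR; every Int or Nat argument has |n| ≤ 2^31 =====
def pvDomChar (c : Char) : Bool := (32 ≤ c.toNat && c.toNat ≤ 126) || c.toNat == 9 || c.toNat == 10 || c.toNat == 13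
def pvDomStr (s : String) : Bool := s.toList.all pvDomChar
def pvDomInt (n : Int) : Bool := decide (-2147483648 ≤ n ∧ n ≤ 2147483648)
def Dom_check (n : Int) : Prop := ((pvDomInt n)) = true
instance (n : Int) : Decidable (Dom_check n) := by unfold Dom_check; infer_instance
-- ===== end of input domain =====

-- B replaces A's two-phase scan (find the peak as the first descent, then scan the tail)
-- by one single pass over adjacent character pairs carrying rising/falling flags; objective: simpler, same O(n) cost.

-- ===== PORT A =====
-- first loop: for i in range(1, len(s)): if s[i] <= s[i-1]: peak = i - 1; break   (indices always in range, so pyGetD is exact)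
def checkLoop1 (cs : List Char) : List Int → Int
  | [] => -1
  | i :: rest =>
      if PySem.List.pyGetD cs i ' ' ≤ PySem.List.pyGetD cs (i - 1) ' ' then i - 1
      else checkLoop1 cs rest

-- second loop: for i in range(peak+1, len(s)): if s[i] >= s[i-1]: return False
def checkLoop2 (cs : List Char) : List Int → Bool
  | [] => true
  | i :: rest =>
      if PySem.List.pyGetD cs i ' ' ≥ PySem.List.pyGetD cs (i - 1) ' ' then false
      else checkLoop2 cs rest

def check (n : Int) : Bool :=
  let s := PySem.Int.toChars n
  if s.length < 3 then false
  else
    let peak := checkLoop1 s (PySem.List.pyRange 1 (s.length : Int) 1)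
    if peak == -1 || peak == 0 then false
    else checkLoop2 s (PySem.List.pyRange (peak + 1) (s.length : Int) 1)

-- ===== PORT B =====
-- the for-loop over zip(s, s[1:]) with its early returns; r/f are the rising/falling flags
def checkAltGo (r f : Bool) : List (Char × Char) → Bool
  | [] => r && f
  | (a, b) :: t =>
      if a = b then false
      else if a < b then
        if f then false else checkAltGo true f t
      else
        if !r then false else checkAltGo r true t

def check_alt (n : Int) : Bool :=
  let s := PySem.Int.toChars n
  checkAltGo false false (s.zip (PySem.List.slice s (some 1) none))

-- ===== PRECONDITION & SPEC =====
def Spec_check (n : Int) (out : Bool) : Prop := out = check_alt n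
instance (n : Int) (out : Bool) : Decidable (Spec_check n out) := by unfold Spec_check; infer_instance

-- ===== CLAIM (what is proved, stated in full; the proofs are below) =====
def Claim_equal_check : Prop := ∀ (n : Int), Dom_check n → Spec_check n (check n)

-- ===== LEMMAS AND PROOFS =====

-- proof-only helpers: the adjacent-pair list of s and the common normal form of both programs
def pvPairs (cs : List Char) : List (Char × Char) := cs.zip (cs.drop 1)
def pvUp (t : List (Char × Char)) : Nat := (t.takeWhile (fun p => decide (p.1 < p.2))).length
def pvN (t : List (Char × Char)) : Bool :=
  decide (0 < pvUp t) && decide (pvUp t < t.length) &&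
    (t.drop (pvUp t)).all (fun p => decide (p.2 < p.1))

theorem go_tt (t : List (Char × Char)) :
    checkAltGo true true t = t.all (fun p => decide (p.2 < p.1)) := by
  induction t with
  | nil => rfl
  | cons p t ih =>
    obtain ⟨a, b⟩ := p
    by_cases hab : a = b
    · simp [checkAltGo, hab]
    · by_cases hlt : a < b
      · simp [checkAltGo, hab, hlt, not_lt_of_gt hlt]
      · have hba : b < a := lt_of_le_of_ne (not_lt.mp hlt) (Ne.symm hab)
        simp [checkAltGo, hab, hlt, hba, ih]

theorem go_tf (t : List (Char × Char)) :
    checkAltGo true false t =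
      (decide (pvUp t < t.length) && (t.drop (pvUp t)).all (fun p => decide (p.2 < p.1))) := by
  induction t with
  | nil => simp [checkAltGo, pvUp]
  | cons p t ih =>
    obtain ⟨a, b⟩ := p
    by_cases hab : a = b
    · simp [checkAltGo, hab, pvUp, List.takeWhile]
    · by_cases hlt : a < b
      · have hu : pvUp ((a,b) :: t) = pvUp t + 1 := by
          simp [pvUp, List.takeWhile, hlt]
        rw [show checkAltGo true false ((a,b) :: t) = checkAltGo true false t from by
              simp [checkAltGo, hab, hlt], ih, hu]
        simp
      · have hba : b < a := lt_of_le_of_ne (not_lt.mp hlt) (Ne.symm hab)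
        simp [checkAltGo, hab, hlt, hba, pvUp, List.takeWhile, go_tt, List.all_cons]

theorem go_ff (t : List (Char × Char)) : checkAltGo false false t = pvN t := by
  cases t with
  | nil => rfl
  | cons p t =>
    obtain ⟨a, b⟩ := p
    by_cases hab : a = b
    · simp [checkAltGo, hab, pvN, pvUp, List.takeWhile]
    · by_cases hlt : a < b
      · have hu : pvUp ((a,b) :: t) = pvUp t + 1 := by
          simp [pvUp, List.takeWhile, hlt]
        rw [show checkAltGo false false ((a,b) :: t) = checkAltGo true false t from by
              simp [checkAltGo, hab, hlt], go_tf]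
        unfold pvN
        rw [hu]
        simp
      · have hba : b < a := lt_of_le_of_ne (not_lt.mp hlt) (Ne.symm hab)
        simp [checkAltGo, hab, hlt, hba, pvN, pvUp, List.takeWhile]

theorem pvPairs_length (cs : List Char) : (pvPairs cs).length = cs.length - 1 := by
  simp [pvPairs]

theorem pvPairs_getElem (cs : List Char) (k : Nat) (hk : k < (pvPairs cs).length) :
    (pvPairs cs)[k] =
      (cs[k]'(by simp [pvPairs] at hk; omega),
       cs[k + 1]'(by simp [pvPairs] at hk; omega)) := by
  simp [pvPairs]

theorem loop1_spec (cs : List Char) (d k : Nat) (hd : cs.length ≤ k + 1 + d) :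
    checkLoop1 cs (PySem.List.pyRange ((k : Int) + 1) (cs.length : Int) 1) =
      (if pvUp ((pvPairs cs).drop k) < ((pvPairs cs).drop k).length
        then ((k + pvUp ((pvPairs cs).drop k) : Nat) : Int) else -1) := by
  induction d generalizing k with
  | zero =>
    have h1 : (cs.length : Int) ≤ (k : Int) + 1 := by exact_mod_cast hd
    rw [PySem.List.pyRange_one_eq_nil h1]
    have h2 : (pvPairs cs).drop k = [] := by
      apply List.drop_eq_nil_of_le; rw [pvPairs_length]; omega
    simp [checkLoop1, h2, pvUp]
  | succ d ih =>
    by_cases hsm : cs.length ≤ k + 1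
    · have h1 : (cs.length : Int) ≤ (k : Int) + 1 := by exact_mod_cast hsm
      rw [PySem.List.pyRange_one_eq_nil h1]
      have h2 : (pvPairs cs).drop k = [] := by
        apply List.drop_eq_nil_of_le; rw [pvPairs_length]; omega
      simp [checkLoop1, h2, pvUp]
    · have hklt : k + 1 < cs.length := by omega
      have h1 : ((k : Int) + 1) < (cs.length : Int) := by exact_mod_cast hklt
      rw [PySem.List.pyRange_one_cons h1]
      have hkp : k < (pvPairs cs).length := by rw [pvPairs_length]; omega
      have hdrop : (pvPairs cs).drop k = (pvPairs cs)[k] :: (pvPairs cs).drop (k + 1) :=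
        List.drop_eq_getElem_cons hkp
      have hget : (pvPairs cs)[k] = (cs[k]'(by omega), cs[k+1]'hklt) := pvPairs_getElem cs k hkp
      have e1 : PySem.List.pyGetD cs ((k : Int) + 1) ' ' = cs[k+1]'hklt := by
        have := PySem.List.pyGetD_natCast cs (k + 1) ' '
        push_cast at this
        rw [this, List.getD_eq_getElem cs ' ' hklt]
      have e0 : PySem.List.pyGetD cs ((k : Int) + 1 - 1) ' ' = cs[k]'(by omega) := by
        have h : (k : Int) + 1 - 1 = ((k : Nat) : Int) := by ring
        rw [h, PySem.List.pyGetD_natCast cs k ' ', List.getD_eq_getElem cs ' ' (by omega)]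
      unfold checkLoop1
      rw [e1, e0]
      by_cases hcond : cs[k+1]'hklt ≤ cs[k]'(by omega : k < cs.length)
      · rw [if_pos hcond]
        have hni : ¬ ((pvPairs cs)[k].1 < (pvPairs cs)[k].2) := by rw [hget]; exact not_lt.mpr hcond
        have hup : pvUp ((pvPairs cs).drop k) = 0 := by
          rw [hdrop]; simp [pvUp, List.takeWhile, hni]
        have hposlen : 0 < ((pvPairs cs).drop k).length := by
          rw [hdrop]; exact Nat.succ_pos _
        rw [hup, if_pos hposlen]
        push_cast; ring
      · have hni : (pvPairs cs)[k].1 < (pvPairs cs)[k].2 := by rw [hget]; exact not_le.mp hcond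
        have hup : pvUp ((pvPairs cs).drop k) = pvUp ((pvPairs cs).drop (k + 1)) + 1 := by
          rw [hdrop]; simp [pvUp, List.takeWhile, hni]
        have hlen : ((pvPairs cs).drop k).length = ((pvPairs cs).drop (k + 1)).length + 1 := by
          rw [hdrop]; simp; omega
        have ihk := ih (k + 1) (by omega)
        have hcast : ((k : Nat) : Int) + 1 + 1 = (((k + 1 : Nat) : Int)) + 1 := by push_cast; ring
        rw [if_neg hcond, hcast, ihk, hup, hlen,
          show k + (pvUp ((pvPairs cs).drop (k + 1)) + 1) = k + 1 + pvUp ((pvPairs cs).drop (k + 1)) from by omega]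
        simp

theorem loop2_spec (cs : List Char) (d k : Nat) (hd : cs.length ≤ k + 1 + d) :
    checkLoop2 cs (PySem.List.pyRange ((k : Int) + 1) (cs.length : Int) 1) =
      ((pvPairs cs).drop k).all (fun p => decide (p.2 < p.1)) := by
  induction d generalizing k with
  | zero =>
    have h1 : (cs.length : Int) ≤ (k : Int) + 1 := by exact_mod_cast hd
    rw [PySem.List.pyRange_one_eq_nil h1]
    have h2 : (pvPairs cs).drop k = [] := by
      apply List.drop_eq_nil_of_le; rw [pvPairs_length]; omega
    simp [checkLoop2, h2]
  | succ d ih =>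
    by_cases hsm : cs.length ≤ k + 1
    · have h1 : (cs.length : Int) ≤ (k : Int) + 1 := by exact_mod_cast hsm
      rw [PySem.List.pyRange_one_eq_nil h1]
      have h2 : (pvPairs cs).drop k = [] := by
        apply List.drop_eq_nil_of_le; rw [pvPairs_length]; omega
      simp [checkLoop2, h2]
    · have hklt : k + 1 < cs.length := by omega
      have h1 : ((k : Int) + 1) < (cs.length : Int) := by exact_mod_cast hklt
      rw [PySem.List.pyRange_one_cons h1]
      have hkp : k < (pvPairs cs).length := by rw [pvPairs_length]; omega
      have hdrop : (pvPairs cs).drop k = (pvPairs cs)[k] :: (pvPairs cs).drop (k + 1) :=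
        List.drop_eq_getElem_cons hkp
      have hget : (pvPairs cs)[k] = (cs[k]'(by omega), cs[k+1]'hklt) := pvPairs_getElem cs k hkp
      have e1 : PySem.List.pyGetD cs ((k : Int) + 1) ' ' = cs[k+1]'hklt := by
        have := PySem.List.pyGetD_natCast cs (k + 1) ' '
        push_cast at this
        rw [this, List.getD_eq_getElem cs ' ' hklt]
      have e0 : PySem.List.pyGetD cs ((k : Int) + 1 - 1) ' ' = cs[k]'(by omega) := by
        have h : (k : Int) + 1 - 1 = ((k : Nat) : Int) := by ring
        rw [h, PySem.List.pyGetD_natCast cs k ' ', List.getD_eq_getElem cs ' ' (by omega)]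
      unfold checkLoop2
      rw [e1, e0, hdrop, List.all_cons, hget]
      by_cases hcond : cs[k]'(by omega : k < cs.length) ≤ cs[k+1]'hklt
      · rw [if_pos hcond]
        simp [not_lt.mpr hcond]
      · have hba : cs[k+1]'hklt < cs[k]'(by omega : k < cs.length) := not_le.mp hcond
        have ihk := ih (k + 1) (by omega)
        have hcast : ((k : Nat) : Int) + 1 + 1 = (((k + 1 : Nat) : Int)) + 1 := by push_cast; ring
        rw [if_neg (by simpa using hcond), hcast, ihk]
        simp [hba]

theorem body_eq (cs : List Char) :
    (if cs.length < 3 then false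
     else
       let peak := checkLoop1 cs (PySem.List.pyRange 1 (cs.length : Int) 1)
       if peak == -1 || peak == 0 then false
       else checkLoop2 cs (PySem.List.pyRange (peak + 1) (cs.length : Int) 1)) =
    pvN (pvPairs cs) := by
  have hL1 := loop1_spec cs cs.length 0 (by omega)
  have hL2 : ∀ u : Nat, checkLoop2 cs (PySem.List.pyRange ((u : Int) + 1) (cs.length : Int) 1) =
      ((pvPairs cs).drop u).all (fun p => decide (p.2 < p.1)) :=
    fun u => loop2_spec cs cs.length u (by omega)
  simp only [List.drop_zero, Nat.cast_zero, zero_add] at hL1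
  set t := pvPairs cs with ht
  have htl : t.length = cs.length - 1 := pvPairs_length cs
  by_cases h3 : cs.length < 3
  · -- short string: A returns False; pvN is false too, since 0 < up ∧ up < |t| would force |t| ≥ 2
    have hN : pvN t = false := by
      unfold pvN
      by_cases h1 : 0 < pvUp t
      · by_cases h2 : pvUp t < t.length
        · omega
        · simp [h2]
      · simp [h1]
    simp [h3, hN]
  · simp only [h3, if_false]
    rw [hL1]
    by_cases hu : pvUp t < t.length
    · simp only [hu, if_true]
      by_cases hz : pvUp t = 0
      · have hT : (((pvUp t : Nat) : Int) == -1 || ((pvUp t : Nat) : Int) == 0) = true := by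
          simp [hz]
        simp only [hT, if_true]
        unfold pvN
        simp [hz]
      · have hne : (((pvUp t : Nat) : Int) == -1 || ((pvUp t : Nat) : Int) == 0) = false := by
          simp; omega
        simp only [hne]
        rw [hL2 (pvUp t)]
        unfold pvN
        simp [hu, Nat.pos_of_ne_zero hz]
    · have hm : ((-1 : Int) == -1 || (-1 : Int) == 0) = true := by decide
      simp only [hu, if_false, hm, if_true]
      unfold pvN
      simp [hu]

-- ===== VERDICT (by name: the statement is the Claim_ definition above) =====
theorem check_spec : Claim_equal_check := by
  intro n _
  show check n = check_alt n
  unfold check check_alt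
  simp only [PySem.List.slice_from_one, ← List.drop_one, go_ff]
  exact body_eq _
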